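-- pv_equiv track=rewrite | github.com/JFF-Bohdan/pygsmmodule | pygsmmodule/shared/support.py | remove_end_result
-- ===== SOURCE A (Python) =====
-- def remove_end_result(data):
--     items_qty = len(data)
--     found_index = None
--
--     for index, value in enumerate(reversed(data)):
--         if str(value).strip():
--             found_index = index
--             break
--
--     return data[:items_qty - (found_index + 1)] if found_index is not None else None
-- ===== SOURCE B (Python) =====
-- def remove_end_result(data):
--     last = None
--     for index, value in enumerate(data):
--         if str(value).strip():
--             last = index
--     return data[:last] if last is not None else None
-- ===== Notes on version B (the rewrite author's own statement) =====
-- stated objective: simpler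
-- what changed: Replaced the reverse scan with early break and the items_qty-(found_index+1) index arithmetic by one forward pass that remembers the index of the last non-blank element and slices directly before it.
import Mathlib
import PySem

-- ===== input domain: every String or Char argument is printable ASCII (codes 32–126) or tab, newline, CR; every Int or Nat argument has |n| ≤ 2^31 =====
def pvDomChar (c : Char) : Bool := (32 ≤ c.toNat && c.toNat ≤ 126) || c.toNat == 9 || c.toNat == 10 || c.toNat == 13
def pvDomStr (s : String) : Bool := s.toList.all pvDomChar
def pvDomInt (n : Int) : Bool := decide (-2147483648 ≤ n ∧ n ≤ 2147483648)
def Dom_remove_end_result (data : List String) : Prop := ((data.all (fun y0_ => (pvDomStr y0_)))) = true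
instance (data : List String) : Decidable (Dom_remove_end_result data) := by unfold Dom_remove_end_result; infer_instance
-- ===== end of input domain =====

-- B replaces A's reverse scan with an early break by one forward pass remembering the
-- last non-blank index, slicing directly before it (objective: simpler).

-- ===== PORT A =====
-- A's loop: first index (counting from the end) whose stripped value is truthy.
def pvFindFirstRev (l : List String) (i : Int) : Option Int :=
  match l with
  | [] => none
  | v :: rest =>
    if (PySem.Chars.strip v.toList) ≠ [] then some i else pvFindFirstRev rest (i + 1)

def remove_end_result (data : List String) : Option (List String) :=
  let items_qty : Int := data.length
  match pvFindFirstRev data.reverse 0 with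
  | some found_index => some (PySem.List.slice data none (some (items_qty - (found_index + 1))))
  | none => none

-- ===== PORT B =====
-- B's loop: forward pass over enumerate(data), remembering the index of the last non-blank.
def pvLastStep (acc : Option Int) (p : Int × String) : Option Int :=
  if (PySem.Chars.strip p.2.toList) ≠ [] then some p.1 else acc

def remove_end_result_alt (data : List String) : Option (List String) :=
  match (PySem.List.enumerate data 0).foldl pvLastStep none with
  | some last => some (PySem.List.slice data none (some last))
  | none => none

-- ===== PRECONDITION & SPEC =====
def Spec_remove_end_result (data : List String) (out : Option (List String)) : Prop := out = remove_end_result_alt data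
instance (data : List String) (out : Option (List String)) : Decidable (Spec_remove_end_result data out) := by unfold Spec_remove_end_result; infer_instance

-- ===== CLAIM (what is proved, stated in full; the proofs are below) =====
def Claim_equal_remove_end_result : Prop := ∀ (data : List String), Dom_remove_end_result data → Spec_remove_end_result data (remove_end_result data)

-- ===== LEMMAS AND PROOFS =====

theorem pvFindFirstRev_shift (l : List String) (i : Int) :
    pvFindFirstRev l (i + 1) = (pvFindFirstRev l i).map (· + 1) := by
  induction l generalizing i with
  | nil => rfl
  | cons v rest ih =>
    simp only [pvFindFirstRev]
    split_ifs with h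
    · rfl
    · exact ih (i + 1)

-- the index A finds (converted to a forward index) is exactly B's remembered last index
theorem pv_main (data : List String) :
    (pvFindFirstRev data.reverse 0).map (fun i => (data.length : Int) - (i + 1))
      = (PySem.List.enumerate data 0).foldl pvLastStep none := by
  induction data using List.reverseRecOn with
  | nil => rfl
  | append_singleton xs x ih =>
    rw [PySem.List.enumerate_append, List.foldl_append]
    simp only [List.reverse_append, List.reverse_cons, List.reverse_nil, List.nil_append,
      List.cons_append, pvFindFirstRev, PySem.List.enumerate, List.foldl, pvLastStep]
    split_ifs with h
    · simp [List.length_append]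
    · rw [pvFindFirstRev_shift xs.reverse 0, Option.map_map, ← ih]
      cases pvFindFirstRev xs.reverse 0 with
      | none => rfl
      | some i =>
        simp only [Option.map_some, Function.comp_apply, List.length_append]
        congr 1
        simp only [List.length_singleton]
        push_cast
        ring

-- ===== VERDICT (by name: the statement is the Claim_ definition above) =====
theorem remove_end_result_spec : Claim_equal_remove_end_result := by
  intro data _
  unfold Spec_remove_end_result remove_end_result remove_end_result_alt
  rw [← pv_main data]
  cases pvFindFirstRev data.reverse 0 with
  | none => rfl
  | some i => rfl
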